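-- pv_equiv track=rewrite | github.com/IvanaXu/leetcode | LCP66.600YaG.py | minNumBooths
-- ===== SOURCE A (Python) =====
-- from typing import List
--
-- def minNumBooths(demand: List[str]) -> int:
--     _maxr = {}
--     for d in demand:
--         _r = {}
--         for i in d:
--             _r[i] = 1 if i not in _r else _r[i]+1
--
--         for _k, _v in _r.items():
--             _maxr[_k] = _v if _k not in _maxr else max([_v, _maxr[_k]])
--     return sum(_maxr.values())
-- ===== SOURCE B (Python) =====
-- from typing import List
--
-- def minNumBooths(demand: List[str]) -> int:
--     chars = set(''.join(demand))
--     return sum(max((d.count(c) for d in demand), default=0) for c in chars)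
-- ===== Notes on version B (the rewrite author's own statement) =====
-- stated objective: simpler
-- what changed: Instead of building a per-string count dict and merging it into a running max-table, B computes the set of distinct characters of the joined input once and sums, for each such character, the maximum per-string count obtained directly with str.count.
import Mathlib
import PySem

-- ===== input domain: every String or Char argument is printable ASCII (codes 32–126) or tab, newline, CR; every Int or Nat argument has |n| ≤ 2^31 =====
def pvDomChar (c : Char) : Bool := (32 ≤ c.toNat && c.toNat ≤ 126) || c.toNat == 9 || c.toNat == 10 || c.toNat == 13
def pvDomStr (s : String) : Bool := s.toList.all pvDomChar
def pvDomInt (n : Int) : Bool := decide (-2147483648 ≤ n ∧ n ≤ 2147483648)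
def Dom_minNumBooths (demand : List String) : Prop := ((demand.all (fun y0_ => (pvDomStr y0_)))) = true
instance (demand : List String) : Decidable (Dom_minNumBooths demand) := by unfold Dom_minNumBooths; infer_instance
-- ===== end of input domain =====

-- B replaces A's per-string dict building / max-merging by a direct sum, over the distinct characters, of the per-string max count; objective: simpler.

-- ===== PORT A =====
def minNumBooths (demand : List String) : Int :=
  let maxr : PySem.Dict Char Int :=
    demand.foldl (fun maxr d =>
      let r : PySem.Dict Char Int :=
        d.toList.foldl (fun r i =>
          r.insert i (if r.contains i = false then 1 else r.getD i 0 + 1)) PySem.Dict.empty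
      r.items.foldl (fun maxr p =>
        maxr.insert p.1 (if maxr.contains p.1 = false then p.2 else max p.2 (maxr.getD p.1 0))) maxr)
      PySem.Dict.empty
  maxr.values.sum

-- ===== PORT B =====
def minNumBooths_alt (demand : List String) : Int :=
  let chars : PySem.Set Char := PySem.Set.ofList (PySem.Str.join "" demand).toList
  (chars.map (fun c =>
    PySem.List.maxD (demand.map (fun d => (PySem.Str.count d (String.ofList [c]) : Int)))
      (fun x => x) 0)).sum

-- ===== PRECONDITION & SPEC =====
def Spec_minNumBooths (demand : List String) (out : Int) : Prop := out = minNumBooths_alt demand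
instance (demand : List String) (out : Int) : Decidable (Spec_minNumBooths demand out) := by unfold Spec_minNumBooths; infer_instance

-- ===== CLAIM (what is proved, stated in full; the proofs are below) =====
def Claim_equal_minNumBooths : Prop := ∀ (demand : List String), Dom_minNumBooths demand → Spec_minNumBooths demand (minNumBooths demand)

-- ===== LEMMAS AND PROOFS =====

-- A's outer-loop body, named for the proofs (identical to the lambda inside the port of A).
def pvG (maxr : PySem.Dict Char Int) (d : String) : PySem.Dict Char Int :=
  (d.toList.foldl (fun r i =>
      r.insert i (if r.contains i = false then 1 else r.getD i 0 + 1)) PySem.Dict.empty).items.foldl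
    (fun maxr p =>
      maxr.insert p.1 (if maxr.contains p.1 = false then p.2 else max p.2 (maxr.getD p.1 0))) maxr

-- A's per-character running maximum after one more string.
def pvStepA (k : Char) (a : Int) (d : String) : Int :=
  if k ∈ d.toList then max ((d.toList.count k : Int)) a else a

lemma pv_count_go_singleton (c : Char) :
    ∀ (s : List Char) (fuel acc : Nat), s.length ≤ fuel →
      PySem.Chars.count.go [c] fuel s acc = acc + s.count c := by
  intro s
  induction s with
  | nil =>
      intro fuel acc _
      cases fuel <;> simp [PySem.Chars.count.go]
  | cons h t ih =>
      intro fuel acc hle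
      cases fuel with
      | zero => simp at hle
      | succ f =>
        by_cases hch : c = h
        · subst hch
          simp [PySem.Chars.count.go, List.isPrefixOf, ih f (acc + 1) (by simpa using hle)]
          omega
        · have hpre : ([c].isPrefixOf (h :: t)) = false := by
            simp [List.isPrefixOf]
            exact fun hc => absurd hc hch
          simp [PySem.Chars.count.go, hpre, ih f acc (by simpa using hle), Ne.symm hch]

lemma pv_str_count_singleton (d : String) (c : Char) :
    PySem.Str.count d (String.ofList [c]) = d.toList.count c := by
  have h : PySem.Chars.count d.toList [c] = d.toList.count c := by
    simp only [PySem.Chars.count]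
    simpa using pv_count_go_singleton c d.toList d.toList.length 0 le_rfl
  simpa [PySem.Str.count_eq] using h

lemma pv_join_nil_flatten : ∀ parts : List (List Char),
    PySem.Chars.join [] parts = parts.flatten := by
  intro parts
  show List.intercalate [] parts = parts.flatten
  induction parts with
  | nil => rfl
  | cons x r ih =>
    cases r with
    | nil => simp [List.intercalate]
    | cons y t =>
      simp only [List.intercalate, List.intersperse] at *
      simp_all [List.flatten]

lemma pv_mem_foldl_add (l : List Char) :
    ∀ (s : PySem.Set Char) (x : Char), (x ∈ s ∨ x ∈ l) → x ∈ l.foldl PySem.Set.add s := by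
  induction l with
  | nil => intro s x hx; simpa using hx
  | cons y l ih =>
      intro s x hx
      apply ih
      rcases hx with hx | hx
      · exact Or.inl ((PySem.Set.mem_add s y x).2 (Or.inl hx))
      · rcases List.mem_cons.1 hx with hx | hx
        · exact Or.inl ((PySem.Set.mem_add s y x).2 (Or.inr hx))
        · exact Or.inr hx

lemma pv_foldl_add_foldl_add (l : List Char) :
    ∀ (t s : PySem.Set Char),
      List.foldl PySem.Set.add s (List.foldl PySem.Set.add t l)
        = List.foldl PySem.Set.add (List.foldl PySem.Set.add s t) l := by
  induction l with
  | nil => intro t s; rfl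
  | cons x l ih =>
      intro t s
      show List.foldl PySem.Set.add s (List.foldl PySem.Set.add (t.add x) l)
          = List.foldl PySem.Set.add ((List.foldl PySem.Set.add s t).add x) l
      rw [ih (t.add x) s]
      congr 1
      by_cases hmem : x ∈ t
      · have hmem2 : x ∈ List.foldl PySem.Set.add s t := pv_mem_foldl_add t s x (Or.inr hmem)
        simp [PySem.Set.add, PySem.Set.contains, hmem, hmem2]
      · have h1 : t.add x = t ++ [x] := by simp [PySem.Set.add, PySem.Set.contains, hmem]
        rw [h1, List.foldl_append]
        rfl

lemma pv_update_ofList (s : PySem.Set Char) (l : List Char) :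
    List.foldl PySem.Set.add s (PySem.Set.ofList l) = List.foldl PySem.Set.add s l := by
  have h := pv_foldl_add_foldl_add l [] s
  simpa [PySem.Set.ofList, PySem.Set.empty] using h

-- the inner counting loop of A is Counter(d)
lemma pv_inner_counter (d : List Char) :
    d.foldl (fun r i =>
        r.insert i (if r.contains i = false then 1 else r.getD i 0 + 1)) PySem.Dict.empty
      = PySem.Dict.counter d := by
  have hstep : (fun (r : PySem.Dict Char Int) i =>
      r.insert i (if r.contains i = false then 1 else r.getD i 0 + 1))
      = fun r i => r.insert i (r.getD i 0 + 1) := by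
    funext r i
    by_cases hc : r.contains i = true
    · simp [hc]
    · have hf : r.contains i = false := by simpa using hc
      simp [hf, PySem.Dict.getD_of_not_contains r 0 hf]
  rw [hstep, PySem.Dict.foldl_insert_getD_add_one_eq_counter]

-- the merge loop of A, evaluated at one key
lemma pv_mergeGetD (v : Char → Int) :
    ∀ (S : List Char), S.Nodup → ∀ (m : PySem.Dict Char Int) (k : Char),
      ((S.map (fun c => (c, v c))).foldl (fun m p =>
          m.insert p.1 (if m.contains p.1 = false then p.2 else max p.2 (m.getD p.1 0))) m).getD k 0
        = if k ∈ S then (if m.contains k = false then v k else max (v k) (m.getD k 0))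
          else m.getD k 0 := by
  intro S
  induction S with
  | nil => intro _ m k; simp
  | cons c S ih =>
      intro hnd m k
      have hcS : c ∉ S := (List.nodup_cons.1 hnd).1
      have hndS : S.Nodup := (List.nodup_cons.1 hnd).2
      simp only [List.map_cons, List.foldl_cons]
      rw [ih hndS]
      by_cases hk : k = c
      · subst hk
        have hkS : k ∉ S := hcS
        simp [hkS, PySem.Dict.getD_insert_self]
      · have h1 : (m.insert c (if m.contains c = false then v c else max (v c) (m.getD c 0))).getD k 0
            = m.getD k 0 := PySem.Dict.getD_insert_of_ne m _ _ hk
        have h2 : (m.insert c (if m.contains c = false then v c else max (v c) (m.getD c 0))).contains k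
            = m.contains k := by
          rw [PySem.Dict.contains_insert]
          simp [hk]
        simp [h1, h2, List.mem_cons, hk]

-- keys of the merge loop
lemma pv_mergeKeys (v : Char → Int) (S : List Char) (m : PySem.Dict Char Int) :
    ((S.map (fun c => (c, v c))).foldl (fun m p =>
        m.insert p.1 (if m.contains p.1 = false then p.2 else max p.2 (m.getD p.1 0))) m).keys
      = List.foldl PySem.Set.add m.keys S := by
  have h := PySem.Dict.keys_foldl_insert_key (S.map (fun c => (c, v c))) Prod.fst
    (fun m p => if m.contains p.1 = false then p.2 else max p.2 (m.getD p.1 0)) m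
  rw [h]
  show List.foldl PySem.Set.add m.keys ((S.map (fun c => (c, v c))).map Prod.fst)
      = List.foldl PySem.Set.add m.keys S
  simp [List.map_map, Function.comp_def]

lemma pv_stepA_nonneg (k : Char) (a : Int) (d : String) (ha : 0 ≤ a) : 0 ≤ pvStepA k a d := by
  unfold pvStepA
  split_ifs with h
  · exact le_trans ha (le_max_right _ _)
  · exact ha

-- the outer-loop invariant of A
lemma pv_outer_inv :
    ∀ (ds : List String) (F : List Char) (m : PySem.Dict Char Int) (v : Char → Int),
      m.keys = PySem.Set.ofList F →
      (∀ k, m.getD k 0 = v k) →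
      (∀ k, 0 ≤ v k) →
      (∀ k, k ∉ F → v k = 0) →
      (ds.foldl pvG m).keys = PySem.Set.ofList (F ++ (ds.map String.toList).flatten)
        ∧ ∀ k, (ds.foldl pvG m).getD k 0 = ds.foldl (fun a d => pvStepA k a d) (v k) := by
  intro ds
  induction ds with
  | nil =>
      intro F m v hkeys hget _ _
      simpa using ⟨hkeys, hget⟩
  | cons d ds ih =>
      intro F m v hkeys hget hnn hzero
      have hGd : pvG m d = ((PySem.Set.ofList d.toList).map
          (fun c => (c, (d.toList.count c : Int)))).foldl (fun m p =>
            m.insert p.1 (if m.contains p.1 = false then p.2 else max p.2 (m.getD p.1 0))) m := by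
        unfold pvG
        rw [pv_inner_counter, PySem.Dict.items_counter]
      have hkeys' : (pvG m d).keys = PySem.Set.ofList (F ++ d.toList) := by
        rw [hGd, pv_mergeKeys, hkeys]
        show List.foldl PySem.Set.add (PySem.Set.ofList F) (PySem.Set.ofList d.toList)
            = PySem.Set.ofList (F ++ d.toList)
        rw [pv_update_ofList]
        show List.foldl PySem.Set.add (PySem.Set.ofList F) d.toList
            = List.foldl PySem.Set.add PySem.Set.empty (F ++ d.toList)
        rw [List.foldl_append]
        rfl
      have hcont : ∀ k, m.contains k = true ↔ k ∈ F := by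
        intro k
        rw [PySem.Dict.contains_iff_mem_keys, hkeys, PySem.Set.mem_ofList]
      have hget' : ∀ k, (pvG m d).getD k 0 = pvStepA k (v k) d := by
        intro k
        rw [hGd, pv_mergeGetD _ _ (PySem.Set.nodup_ofList d.toList), hget]
        unfold pvStepA
        by_cases hmem : k ∈ d.toList
        · simp only [PySem.Set.mem_ofList, hmem, if_pos]
          by_cases hF : k ∈ F
          · have hct : m.contains k = true := (hcont k).2 hF
            simp [hct, max_comm]
          · have hc : m.contains k = false := by
              rcases Bool.eq_false_or_eq_true (m.contains k) with h | h
              · exact absurd ((hcont k).1 h) hF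
              · exact h
            have hv0 : v k = 0 := hzero k hF
            simp [hc, hv0]
        · simp [PySem.Set.mem_ofList, hmem]
      have := ih (F ++ d.toList) (pvG m d) (fun k => pvStepA k (v k) d) hkeys' hget'
        (fun k => pv_stepA_nonneg k (v k) d (hnn k))
        (by
          intro k hk
          have hkd : k ∉ d.toList := fun h => hk (List.mem_append.2 (Or.inr h))
          have hkF : k ∉ F := fun h => hk (List.mem_append.2 (Or.inl h))
          simp [pvStepA, hkd, hzero k hkF])
      refine ⟨?_, ?_⟩
      · rw [List.foldl_cons, this.1]
        simp [List.append_assoc]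
      · intro k
        rw [List.foldl_cons, this.2 k, List.foldl_cons]

-- values of a nodup-keys dict, pointwise
lemma pv_values_eq (d : PySem.Dict Char Int) (h : d.keys.Nodup) :
    d.values = d.keys.map (fun k => d.getD k 0) := by
  show d.items.map Prod.snd = (d.items.map Prod.fst).map (fun k => d.getD k 0)
  rw [List.map_map]
  apply List.map_congr_left
  intro p hp
  have hv : d.getD p.1 0 = p.2 :=
    PySem.Dict.getD_of_mem_items d (by simpa using hp) h 0
  simp [hv]

-- A as a sum over the distinct characters
lemma pv_A_eq (demand : List String) :
    minNumBooths demand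
      = ((PySem.Set.ofList (demand.map String.toList).flatten).map
          (fun k => demand.foldl (fun a d => pvStepA k a d) 0)).sum := by
  have hA : minNumBooths demand = (demand.foldl pvG PySem.Dict.empty).values.sum := rfl
  obtain ⟨hkeys, hget⟩ := pv_outer_inv demand [] PySem.Dict.empty (fun _ => 0)
    (by simp [PySem.Set.ofList]) (by simp) (fun _ => le_rfl) (fun _ _ => rfl)
  simp only [List.nil_append] at hkeys
  have hnd : (demand.foldl pvG PySem.Dict.empty).keys.Nodup := by
    rw [hkeys]; exact PySem.Set.nodup_ofList _
  rw [hA, pv_values_eq _ hnd, hkeys]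
  congr 1
  apply List.map_congr_left
  intro k _
  exact hget k

lemma pv_maxD_eq (xs : List Int) (h0 : ∀ x ∈ xs, 0 ≤ x) :
    PySem.List.maxD xs (fun x => x) 0 = xs.foldl max 0 := by
  cases xs with
  | nil => rfl
  | cons c xs =>
      have hc : 0 ≤ c := h0 c List.mem_cons_self
      unfold PySem.List.maxD
      rw [PySem.List.max?_id_cons]
      simp [List.foldl_cons, max_eq_right hc]

lemma pv_B_fold (k : Char) (demand : List String) :
    ∀ a : Int, 0 ≤ a →
      (demand.map (fun d => (d.toList.count k : Int))).foldl max a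
        = demand.foldl (fun a d => pvStepA k a d) a := by
  induction demand with
  | nil => intro a _; rfl
  | cons d ds ih =>
      intro a ha
      simp only [List.map_cons, List.foldl_cons]
      by_cases hmem : k ∈ d.toList
      · rw [show max a ((d.toList.count k : Int)) = pvStepA k a d by
          simp [pvStepA, hmem, max_comm]]
        exact ih _ (pv_stepA_nonneg k a d ha)
      · have hc0 : ((d.toList.count k : Int)) = 0 := by
          simp [List.count_eq_zero.2 hmem]
        rw [show max a ((d.toList.count k : Int)) = pvStepA k a d by
          simp [pvStepA, hmem, hc0, max_eq_left ha]]
        exact ih _ (pv_stepA_nonneg k a d ha)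

lemma pv_B_eq (demand : List String) :
    minNumBooths_alt demand
      = ((PySem.Set.ofList (demand.map String.toList).flatten).map
          (fun k => demand.foldl (fun a d => pvStepA k a d) 0)).sum := by
  have hjoin : (PySem.Str.join "" demand).toList = (demand.map String.toList).flatten := by
    rw [PySem.Str.toList_join]
    exact pv_join_nil_flatten _
  show ((PySem.Set.ofList (PySem.Str.join "" demand).toList).map (fun c =>
      PySem.List.maxD (demand.map (fun d => (PySem.Str.count d (String.ofList [c]) : Int)))
        (fun x => x) 0)).sum = _
  rw [hjoin]
  congr 1
  apply List.map_congr_left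
  intro c _
  have hcnt : (demand.map (fun d => (PySem.Str.count d (String.ofList [c]) : Int)))
      = demand.map (fun d => (d.toList.count c : Int)) := by
    apply List.map_congr_left
    intro d _
    rw [pv_str_count_singleton]
  rw [hcnt, pv_maxD_eq _ (by
    intro x hx
    obtain ⟨d, _, rfl⟩ := List.mem_map.1 hx
    exact Int.natCast_nonneg _), pv_B_fold c demand 0 le_rfl]

-- ===== VERDICT (by name: the statement is the Claim_ definition above) =====
theorem minNumBooths_spec : Claim_equal_minNumBooths := by
  intro demand _
  show minNumBooths demand = minNumBooths_alt demand
  rw [pv_A_eq, pv_B_eq]
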